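-- pv_equiv track=rewrite | github.com/zaxtax/bustle | bustle.py | propertySignatureSize
-- ===== SOURCE A (Python) =====
-- def propertySignatureSize(Its, Ot, llProps):
--     size = 0
--
--     for It in Its:
--         for typs, props in llProps:
--             if len(typs) == 1:
--                 if typs[0] == It:
--                     size += len(props)
--                 if typs[0] == Ot:
--                     size += len(props)
--             elif len(typs) == 2:
--                 if typs[0] == It and typs[1] == Ot:
--                     size += len(props)
--     return size
-- ===== SOURCE B (Python) =====
-- def propertySignatureSize(Its, Ot, llProps):
--     cnt = {}
--     for It in Its:
--         cnt[It] = cnt.get(It, 0) + 1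
--     n = len(Its)
--     size = 0
--     for typs, props in llProps:
--         if len(typs) == 1:
--             size += len(props) * cnt.get(typs[0], 0)
--             if typs[0] == Ot:
--                 size += len(props) * n
--         elif len(typs) == 2 and typs[1] == Ot:
--             size += len(props) * cnt.get(typs[0], 0)
--     return size
-- ===== Notes on version B (the rewrite author's own statement) =====
-- stated objective: faster
-- what changed: Instead of the nested loop over Its x llProps, B builds a counter of Its once and makes a single pass over llProps, multiplying each property-list length by the count of its matching input type (plus len(Its) for the Ot-matching single-type props).
import Mathlib
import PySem

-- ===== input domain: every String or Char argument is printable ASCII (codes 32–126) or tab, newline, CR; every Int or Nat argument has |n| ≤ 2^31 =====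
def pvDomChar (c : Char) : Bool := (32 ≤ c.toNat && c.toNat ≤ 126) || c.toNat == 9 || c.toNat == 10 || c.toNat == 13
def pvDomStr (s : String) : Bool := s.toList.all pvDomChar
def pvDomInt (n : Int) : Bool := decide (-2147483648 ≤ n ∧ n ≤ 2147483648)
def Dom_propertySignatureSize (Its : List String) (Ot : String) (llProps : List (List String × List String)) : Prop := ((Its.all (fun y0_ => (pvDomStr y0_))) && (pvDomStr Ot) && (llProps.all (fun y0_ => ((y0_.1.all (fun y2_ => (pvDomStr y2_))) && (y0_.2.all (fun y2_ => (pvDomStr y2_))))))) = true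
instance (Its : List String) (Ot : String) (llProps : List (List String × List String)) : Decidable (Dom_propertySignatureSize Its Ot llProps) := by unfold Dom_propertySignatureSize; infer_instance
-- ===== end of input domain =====

-- B replaces A's nested loop over Its × llProps by one counter of Its and a single pass over llProps (asymptotically faster).

-- ===== PORT A =====
-- literal transliteration: outer loop over Its, inner loop over llProps, same branch order
def propertySignatureSize (Its : List String) (Ot : String) (llProps : List (List String × List String)) : Int :=
  Its.foldl (fun size It =>
    llProps.foldl (fun size tp =>
      match tp.1 with
      | [t] =>
        let size := if t == It then size + (tp.2.length : Int) else size
        if t == Ot then size + (tp.2.length : Int) else size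
      | [t1, t2] =>
        if t1 == It && t2 == Ot then size + (tp.2.length : Int) else size
      | _ => size) size) 0

-- ===== PORT B =====
-- literal transliteration of Source B: build cnt (a dict counter of Its), then one pass over llProps
def propertySignatureSize_alt (Its : List String) (Ot : String) (llProps : List (List String × List String)) : Int :=
  let cnt := Its.foldl (fun d x => d.insert x (d.getD x 0 + 1)) PySem.Dict.empty
  let n : Int := Its.length
  llProps.foldl (fun size tp =>
    if tp.1.length = 1 then
      let size := size + (tp.2.length : Int) * cnt.getD (PySem.List.pyGetD tp.1 0 "") 0
      if PySem.List.pyGetD tp.1 0 "" == Ot then size + (tp.2.length : Int) * n else size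
    else if tp.1.length = 2 then
      if PySem.List.pyGetD tp.1 1 "" == Ot then
        size + (tp.2.length : Int) * cnt.getD (PySem.List.pyGetD tp.1 0 "") 0
      else size
    else size) 0

-- ===== PRECONDITION & SPEC =====
def Spec_propertySignatureSize (Its : List String) (Ot : String) (llProps : List (List String × List String)) (out : Int) : Prop := out = propertySignatureSize_alt Its Ot llProps
instance (Its : List String) (Ot : String) (llProps : List (List String × List String)) (out : Int) : Decidable (Spec_propertySignatureSize Its Ot llProps out) := by unfold Spec_propertySignatureSize; infer_instance

-- ===== CLAIM (what is proved, stated in full; the proofs are below) =====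
def Claim_equal_propertySignatureSize : Prop := ∀ (Its : List String) (Ot : String) (llProps : List (List String × List String)), Dom_propertySignatureSize Its Ot llProps → Spec_propertySignatureSize Its Ot llProps (propertySignatureSize Its Ot llProps)

-- ===== LEMMAS AND PROOFS =====

-- contribution of one (typs, props) pair for a fixed It, as A computes it
def gA (Ot It : String) (tp : List String × List String) : Int :=
  match tp.1 with
  | [t] => (if t == It then (tp.2.length : Int) else 0) + (if t == Ot then (tp.2.length : Int) else 0)
  | [t1, t2] => if t1 == It && t2 == Ot then (tp.2.length : Int) else 0
  | _ => 0

-- contribution of one (typs, props) pair as B computes it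
def gB (Its : List String) (Ot : String) (tp : List String × List String) : Int :=
  match tp.1 with
  | [t] => (tp.2.length : Int) * (Its.count t : Int) + (if t == Ot then (tp.2.length : Int) * (Its.length : Int) else 0)
  | [t1, t2] => if t2 == Ot then (tp.2.length : Int) * (Its.count t1 : Int) else 0
  | _ => 0

theorem A_inner (Ot It : String) (ll : List (List String × List String)) (size : Int) :
    ll.foldl (fun size tp =>
      match tp.1 with
      | [t] =>
        let size := if t == It then size + (tp.2.length : Int) else size
        if t == Ot then size + (tp.2.length : Int) else size
      | [t1, t2] =>
        if t1 == It && t2 == Ot then size + (tp.2.length : Int) else size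
      | _ => size) size = size + (ll.map (gA Ot It)).sum := by
  refine Eq.trans (PySem.List.foldl_congr_mem _ _ _ _ ?_) (PySem.List.foldl_add ll (gA Ot It) size)
  intro acc tp _
  rcases tp with ⟨typs, props⟩
  rcases typs with _ | ⟨t, _ | ⟨t2, _ | rest⟩⟩ <;> simp [gA] <;> split_ifs <;> ring

theorem A_eq (Its : List String) (Ot : String) (ll : List (List String × List String)) :
    propertySignatureSize Its Ot ll = (Its.map (fun It => (ll.map (gA Ot It)).sum)).sum := by
  unfold propertySignatureSize
  refine Eq.trans (Eq.trans (PySem.List.foldl_congr_mem _ _ _ _ ?_)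
    (PySem.List.foldl_add Its (fun It => (ll.map (gA Ot It)).sum) 0)) (zero_add _)
  intro acc It _
  exact A_inner Ot It ll acc

theorem B_eq (Its : List String) (Ot : String) (ll : List (List String × List String)) :
    propertySignatureSize_alt Its Ot ll = (ll.map (gB Its Ot)).sum := by
  unfold propertySignatureSize_alt
  refine Eq.trans (Eq.trans (PySem.List.foldl_congr_mem _ _ _ _ ?_)
    (PySem.List.foldl_add ll (gB Its Ot) 0)) (zero_add _)
  intro acc tp _
  rcases tp with ⟨typs, props⟩
  rcases typs with _ | ⟨t, _ | ⟨t2, _ | rest⟩⟩ <;>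
    simp only [gB, PySem.Dict.foldl_insert_getD_add_one_eq_counter, PySem.Dict.getD_counter,
      List.length_nil, List.length_cons, PySem.List.pyGetD] <;>
    norm_num <;> (try split_ifs) <;> (try simp) <;> ring

theorem sum_if_beq (t : String) (L : Int) (Its : List String) :
    (Its.map (fun It => if t == It then L else 0)).sum = L * (Its.count t : Int) := by
  induction Its with
  | nil => simp
  | cons x xs ih =>
    simp only [List.map_cons, List.sum_cons, ih, List.count_cons]
    by_cases h : t = x
    · subst h; simp; ring
    · have h1 : (t == x) = false := by simp [h]
      have h2 : (x == t) = false := by simp [Ne.symm h]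
      simp [h1, h2]

theorem sum_const_if (c : Prop) [Decidable c] (L : Int) (Its : List String) :
    (Its.map (fun _ => if c then L else 0)).sum = if c then L * (Its.length : Int) else 0 := by
  split_ifs with h
  · induction Its with
    | nil => simp
    | cons x xs ih => simp; ring
  · simp

theorem pointwise (Its : List String) (Ot : String) (tp : List String × List String) :
    (Its.map (fun It => gA Ot It tp)).sum = gB Its Ot tp := by
  rcases tp with ⟨typs, props⟩
  rcases typs with _ | ⟨t, _ | ⟨t2, _ | rest⟩⟩
  · simp [gA, gB]
  · simp only [gA, gB]
    rw [List.sum_map_add, sum_if_beq, sum_const_if]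
  · simp only [gA, gB]
    by_cases h : t2 == Ot
    · simp only [h, Bool.and_true, if_true]
      exact sum_if_beq t props.length Its
    · simp only [h, Bool.and_false]
      simp
  · simp [gA, gB]

theorem swap_sums (Its : List String) (Ot : String) (ll : List (List String × List String)) :
    (Its.map (fun It => (ll.map (gA Ot It)).sum)).sum = (ll.map (gB Its Ot)).sum := by
  induction ll with
  | nil => simp
  | cons tp rest ih =>
    simp only [List.map_cons, List.sum_cons]
    rw [List.sum_map_add, ih, pointwise]

-- ===== VERDICT (by name: the statement is the Claim_ definition above) =====
theorem propertySignatureSize_spec : Claim_equal_propertySignatureSize := by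
  intro Its Ot ll _
  unfold Spec_propertySignatureSize
  rw [A_eq, B_eq, swap_sums]
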